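-- pv_equiv track=rewrite | github.com/RuiApostolo/xyz_com_merge | xyz_com_merge.py | molSize
-- ===== SOURCE A (Python) =====
-- def molSize(frames: dict) -> int:
--     """
--     Check whether the size of the molecule is consistent.
--
--     Args:
--         frames: The frames read from the XYZ file.
--
--     Returns:
--         molSize for every timestep has the same size.
--         Returns 0 if molSize differs.
--     """
--     size_list = []
--     for frame in frames:
--         size_list.append(frames[frame]['molsize'])
--     size_set = set(size_list)
--     if len(size_set) == 1 and size_list[0] != 0:
--         mol_size = size_list[0]
--         return mol_size
--     else:
--         return 0
-- ===== SOURCE B (Python) =====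
-- def molSize(frames: dict) -> int:
--     """Single-pass all-equal scan: no intermediate list or set, early exit on mismatch."""
--     first = None
--     for fdata in frames.values():
--         size = fdata['molsize']
--         if first is None:
--             first = size
--         elif size != first:
--             return 0
--     if first is None or first == 0:
--         return 0
--     return first
-- ===== Notes on version B (the rewrite author's own statement) =====
-- stated objective: simpler
-- what changed: Replaced the build-a-list-then-set uniqueness test by a single early-exiting all-equal scan over frames.values() that keeps only the first size seen.
import Mathlib
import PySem

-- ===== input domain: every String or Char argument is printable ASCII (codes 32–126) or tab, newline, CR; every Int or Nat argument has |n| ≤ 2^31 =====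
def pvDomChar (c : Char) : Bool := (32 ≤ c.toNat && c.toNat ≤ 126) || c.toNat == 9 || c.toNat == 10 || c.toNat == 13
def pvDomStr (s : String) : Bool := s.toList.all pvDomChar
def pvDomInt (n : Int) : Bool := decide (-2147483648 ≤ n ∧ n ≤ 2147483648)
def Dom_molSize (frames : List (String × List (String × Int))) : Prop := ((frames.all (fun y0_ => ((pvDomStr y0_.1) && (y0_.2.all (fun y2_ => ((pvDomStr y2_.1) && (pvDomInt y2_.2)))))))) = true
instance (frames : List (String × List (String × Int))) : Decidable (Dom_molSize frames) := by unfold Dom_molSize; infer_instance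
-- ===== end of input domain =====

-- B replaces A's build-list-then-set uniqueness test by a single early-exiting all-equal scan (simpler; no speed claim).


-- ===== PORT A =====
-- inner dict lookup fdata['molsize']; total form, exact under Pre_ (key present)
def getMolsize (inner : List (String × Int)) : Int :=
  ((inner.find? (fun q => q.1 == "molsize")).map (·.2)).getD 0

-- outer dict lookup frames[frame] (first match); total form, exact under Pre_
def getFrame (frames : List (String × List (String × Int))) (k : String) : List (String × Int) :=
  ((frames.find? (fun q => q.1 == k)).map (·.2)).getD []

def molSize (frames : List (String × List (String × Int))) : Int :=
  let size_list := frames.foldl (fun acc p => acc ++ [getMolsize (getFrame frames p.1)]) []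
  let size_set := PySem.Set.ofList size_list
  if size_set.length = 1 ∧ PySem.List.pyGetD size_list 0 0 ≠ 0 then
    PySem.List.pyGetD size_list 0 0
  else 0

-- ===== PORT B =====
def molSizeScan : Option Int → List (String × List (String × Int)) → Int
  | first, [] => match first with
      | none => 0
      | some f => if f = 0 then 0 else f
  | first, p :: rest =>
      let size := getMolsize p.2
      match first with
      | none => molSizeScan (some size) rest
      | some f => if size ≠ f then 0 else molSizeScan (some f) rest

def molSize_alt (frames : List (String × List (String × Int))) : Int :=
  molSizeScan none frames

-- ===== PRECONDITION & SPEC =====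
-- Pre_ requires distinct frame keys (the association list encodes a Python dict, which cannot
-- hold duplicate keys) and every frame to contain the 'molsize' key (A raises KeyError otherwise).
def Pre_molSize (frames : List (String × List (String × Int))) : Prop :=
  (frames.map (·.1)).Nodup ∧ ∀ p ∈ frames, "molsize" ∈ p.2.map (·.1)
instance (frames : List (String × List (String × Int))) : Decidable (Pre_molSize frames) := by unfold Pre_molSize; infer_instance

def pvWitness_molSize : (List (String × List (String × Int))) :=
  [("f1", [("molsize", 5)]), ("f2", [("molsize", 5)])]

def Spec_molSize (frames : List (String × List (String × Int))) (out : Int) : Prop := out = molSize_alt frames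
instance (frames : List (String × List (String × Int))) (out : Int) : Decidable (Spec_molSize frames out) := by unfold Spec_molSize; infer_instance

-- ===== CLAIM (what is proved, stated in full; the proofs are below) =====
def Claim_equal_molSize : Prop := ∀ (frames : List (String × List (String × Int))), Dom_molSize frames → Pre_molSize frames → Spec_molSize frames (molSize frames)

-- ===== LEMMAS AND PROOFS =====

-- with nodup keys, looking an entry's key back up returns that entry's value
lemma getFrame_self (frames : List (String × List (String × Int)))
    (hnd : (frames.map (·.1)).Nodup) (p : String × List (String × Int)) (hp : p ∈ frames) :
    getFrame frames p.1 = p.2 := by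
  induction frames with
  | nil => cases hp
  | cons q t ih =>
    simp only [List.map_cons, List.nodup_cons] at hnd
    rcases List.mem_cons.mp hp with h | hp
    · subst h; simp [getFrame]
    · by_cases h : q.1 = p.1
      · exact absurd (h ▸ List.mem_map_of_mem hp) hnd.1
      · simpa [getFrame, h] using ih hnd.2 hp

lemma foldl_size_list (frames0 frames : List (String × List (String × Int))) :
    frames.foldl (fun acc p => acc ++ [getMolsize (getFrame frames0 p.1)]) []
      = frames.map (fun p => getMolsize (getFrame frames0 p.1)) := by
  simpa using PySem.List.foldl_append_singleton_eq_map (fun p => getMolsize (getFrame frames0 p.1)) frames []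

lemma length_le_foldl_add (l s : List Int) : s.length ≤ (l.foldl PySem.Set.add s).length := by
  induction l generalizing s with
  | nil => simp
  | cons x t ih =>
    refine le_trans ?_ (ih (PySem.Set.add s x))
    simp only [PySem.Set.add]
    split <;> simp

lemma foldl_add_length_one (f : Int) (l : List Int) :
    ((l.foldl PySem.Set.add [f]).length = 1) ↔ (∀ x ∈ l, x = f) := by
  induction l with
  | nil => simp
  | cons x t ih =>
    by_cases h : x = f
    · subst h
      simp only [List.foldl_cons, List.mem_cons]
      have : PySem.Set.add [x] x = [x] := by simp [PySem.Set.add, PySem.Set.contains]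
      rw [this]
      rw [ih]
      constructor
      · rintro h y (rfl | hy)
        · rfl
        · exact h y hy
      · intro h y hy; exact h y (Or.inr hy)
    · have hadd : PySem.Set.add [f] x = [f, x] := by
        simp [PySem.Set.add, PySem.Set.contains, h]
      simp only [List.foldl_cons, hadd]
      constructor
      · intro hlen
        have := length_le_foldl_add t [f, x]
        simp only [List.length_cons, List.length_nil] at this
        omega
      · intro hall
        exact absurd (hall x (by simp)) h

lemma set_ofList_cons_length_one (f : Int) (l : List Int) :
    ((PySem.Set.ofList (f :: l)).length = 1) ↔ (∀ x ∈ l, x = f) := by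
  have : PySem.Set.ofList (f :: l) = l.foldl PySem.Set.add [f] := by
    rw [PySem.Set.ofList_eq_foldl]
    simp [PySem.Set.add, PySem.Set.contains]
  rw [this, foldl_add_length_one]

lemma molSizeScan_some (f : Int) (rest : List (String × List (String × Int))) :
    molSizeScan (some f) rest
      = if ∀ p ∈ rest, getMolsize p.2 = f then (if f = 0 then 0 else f) else 0 := by
  induction rest with
  | nil => simp [molSizeScan]
  | cons p t ih =>
    by_cases h : getMolsize p.2 = f
    · simp only [molSizeScan]
      rw [if_neg (by simp [h]), ih]
      by_cases hall : ∀ q ∈ t, getMolsize q.2 = f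
      · rw [if_pos hall, if_pos (show ∀ q ∈ p :: t, getMolsize q.2 = f from List.forall_mem_cons.mpr ⟨h, hall⟩)]
      · rw [if_neg hall, if_neg (fun hc => hall (List.forall_mem_cons.mp hc).2)]
    · simp [molSizeScan, h]

-- ===== VERDICT (by name: the statement is the Claim_ definition above) =====
theorem molSize_spec : Claim_equal_molSize := by
  intro frames _hdom hpre
  unfold Spec_molSize
  obtain ⟨hnd, _hkeys⟩ := hpre
  unfold molSize molSize_alt
  rw [foldl_size_list]
  have hmap : frames.map (fun p => getMolsize (getFrame frames p.1))
      = frames.map (fun p => getMolsize p.2) :=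
    List.map_congr_left (fun p hp => by rw [getFrame_self frames hnd p hp])
  rw [hmap]
  cases frames with
  | nil => simp [molSizeScan, PySem.Set.ofList]
  | cons p rest =>
    simp only [List.map_cons, molSizeScan]
    have hget : PySem.List.pyGetD (getMolsize p.2 :: rest.map (fun q => getMolsize q.2)) 0 0
        = getMolsize p.2 := by
      simp [PySem.List.pyGetD, PySem.List.pyGet?, PySem.List.pyIdx?]
    rw [molSizeScan_some]
    simp only [set_ofList_cons_length_one, hget]
    simp only [List.forall_mem_map]
    by_cases hz : getMolsize p.2 = 0
    · simp [hz]
    · rw [if_neg hz]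
      by_cases hall : ∀ q ∈ rest, getMolsize q.2 = getMolsize p.2
      · rw [if_pos ⟨hall, hz⟩, if_pos hall]
      · rw [if_neg (fun hc => hall hc.1), if_neg hall]
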